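-- pv_equiv track=rewrite | github.com/amosnier/ecg | ecg4irq.py | vectors_from_stream
-- ===== SOURCE A (Python) =====
-- def vectors_from_stream(stream):
--     vectors_found = False
--     vectors = []
--     max_handler_name_len = 0
--     for line in stream:
--
--         # Search for '__Vectors       DCD     __initial_sp                      ; Top of Stack'
--
--         parts = line.split(sep=';')
--         if not parts:
--             continue
--         words = parts[0].split()
--         if not words:
--             continue
--         if not vectors_found:
--             if not words[0] == '__Vectors':
--                 continue
--             assert words[1] == 'DCD' and words[2] == '__initial_sp'
--             vectors_found = True
--             continue
--
--         # At this point, we know we are in the vector area, and there are words,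
--         # which means we are on an exception/interrupt, or at the end.
--
--         if words[0] == '__Vectors_End':
--             break
--         assert words[0] == 'DCD' and len(words) == 2
--         vectors.append((words[1], parts[1].strip()))
--         max_handler_name_len = max(max_handler_name_len, len(words[1]))
--
--     return vectors, max_handler_name_len
-- ===== SOURCE B (Python) =====
-- def vectors_from_stream(stream):
--     # Index-and-slice pipeline: split all lines up front, locate the header and
--     # the end marker by index, slice the table between them, build the result
--     # declaratively.  (A's asserts raise on malformed input, outside Pre_;
--     # there B simply returns what the slice yields.)
--     lines = [line.split(sep=';') for line in stream]
--     words = [parts[0].split() for parts in lines]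
--     starts = [i for i, w in enumerate(words) if w[:1] == ['__Vectors']]
--     if not starts:
--         return [], 0
--     first = starts[0]
--     tail = list(zip(lines, words))[first + 1:]
--     ends = [k for k, (_, w) in enumerate(tail) if w[:1] == ['__Vectors_End']]
--     stop = ends[0] if ends else len(tail)
--     vectors = [(w[1], parts[1].strip()) for parts, w in tail[:stop] if w]
--     return vectors, max((len(name) for name, _ in vectors), default=0)
-- ===== Notes on version B (the rewrite author's own statement) =====
-- stated objective: alternative
-- what changed: Replaced A's single-pass boolean state machine with running max by an index-and-slice pipeline: split all lines into a table up front, locate the header and end-marker indices with comprehensions, slice the table between them, build the vectors with one comprehension and take the max name length at the end.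
import Mathlib
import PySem

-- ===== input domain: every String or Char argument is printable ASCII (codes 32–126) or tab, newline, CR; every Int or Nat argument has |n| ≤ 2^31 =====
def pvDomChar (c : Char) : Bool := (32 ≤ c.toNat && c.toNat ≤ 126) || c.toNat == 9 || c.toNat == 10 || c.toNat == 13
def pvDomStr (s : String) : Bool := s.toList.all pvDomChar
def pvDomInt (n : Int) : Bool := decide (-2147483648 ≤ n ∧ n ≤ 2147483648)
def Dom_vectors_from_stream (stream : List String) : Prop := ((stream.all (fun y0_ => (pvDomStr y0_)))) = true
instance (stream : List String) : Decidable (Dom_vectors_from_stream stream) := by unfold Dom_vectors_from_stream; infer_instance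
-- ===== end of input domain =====

-- B replaces A's boolean state machine by an index-and-slice pipeline (split all lines,
-- find the header/end-marker indices, slice, one comprehension + trailing max): an
-- alternative decomposition, same cost.


-- ===== PORT A =====
-- the 'for line in stream' loop with state (vectors_found, vectors, max_handler_name_len);
-- 'break' returns the state, sep=';' is nonempty so split? is always some.
-- On lines where the Python asserts fail / indexes past the end (excluded by Pre_ below)
-- the port skips the raise and reads missing elements with getD "".
def pvGoA : List String → Bool → List (String × String) → Int → (List (String × String)) × Int
  | [], _, vecs, m => (vecs, m)
  | line :: rest, found, vecs, m =>
    let parts := (PySem.Str.split? line ";").getD []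
    if parts = [] then pvGoA rest found vecs m
    else
      let words := PySem.Str.split₀ parts.headI
      if words = [] then pvGoA rest found vecs m
      else if found = false then
        if words.headI = "__Vectors" then pvGoA rest true vecs m
        else pvGoA rest found vecs m
      else if words.headI = "__Vectors_End" then (vecs, m)
      else pvGoA rest found (vecs ++ [(words.getD 1 "", PySem.Str.strip (parts.getD 1 ""))])
             (max m (PySem.Str.len (words.getD 1 "")))

def vectors_from_stream (stream : List String) : (List (String × String)) × Int :=
  pvGoA stream false [] 0

-- ===== PORT B =====
-- Source B, line by line: the lines/words tables, the 'starts' comprehension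
-- (enumerate ported as indices over List.range), the early return, the slice
-- 'list(zip(lines, words))[first+1:]' (drop of the zip), the 'ends' comprehension
-- over the tail, the slice tail[:stop] (take), the vectors comprehension
-- (filter + map), and max(..., default=0).
def vectors_from_stream_alt (stream : List String) : (List (String × String)) × Int :=
  let lines := stream.map (fun line => (PySem.Str.split? line ";").getD [])
  let words := lines.map (fun parts => PySem.Str.split₀ parts.headI)
  let starts := (List.range words.length).filter
    (fun i => decide ((words.getD i []).take 1 = ["__Vectors"]))
  if starts = [] then ([], 0)
  else
    let first := starts.headI
    let tail := (lines.zip words).drop (first + 1)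
    let ends := (List.range tail.length).filter
      (fun k => decide ((tail.getD k ([], [])).2.take 1 = ["__Vectors_End"]))
    let stop := ends.headD tail.length
    let vectors := ((tail.take stop).filter (fun pw => !pw.2.isEmpty)).map
      (fun pw => (pw.2.getD 1 "", PySem.Str.strip (pw.1.getD 1 "")))
    (vectors, PySem.List.maxD (vectors.map (fun p => PySem.Str.len p.1)) (fun x => x) 0)

-- ===== PRECONDITION & SPEC =====
-- helpers for Pre_: the words of a line (before ';'), trigger/end tests, and the two
-- well-formedness checks behind A's asserts and its parts[1]/words[1..2] accesses
def pvLineWords (line : String) : List String :=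
  PySem.Str.split₀ (((PySem.Str.split? line ";").getD []).headI)
def pvIsTrigger (line : String) : Bool := (pvLineWords line).headI == "__Vectors"
def pvIsEnd (line : String) : Bool := (pvLineWords line).headI == "__Vectors_End"
def pvOkHeader (line : String) : Bool :=
  3 ≤ (pvLineWords line).length && (pvLineWords line).getD 1 "" == "DCD"
    && (pvLineWords line).getD 2 "" == "__initial_sp"
def pvOkBody (line : String) : Bool :=
  (pvLineWords line).length == 2 && (pvLineWords line).headI == "DCD"
    && 2 ≤ ((PySem.Str.split? line ";").getD []).length

-- Pre_ excludes exactly the inputs on which Python A raises (AssertionError/IndexError):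
-- a first '__Vectors' line not of the form '__Vectors DCD __initial_sp …', or a non-blank
-- line between it and '__Vectors_End' that is not 'DCD <name>' followed by a ';' part.
def Pre_vectors_from_stream (stream : List String) : Prop :=
  stream.findIdx pvIsTrigger < stream.length →
    pvOkHeader (stream.getD (stream.findIdx pvIsTrigger) "") = true ∧
    ((stream.drop (stream.findIdx pvIsTrigger + 1)).takeWhile (fun l => !(pvIsEnd l))).all
      (fun l => (pvLineWords l).isEmpty || pvOkBody l) = true
instance (stream : List String) : Decidable (Pre_vectors_from_stream stream) := by
  unfold Pre_vectors_from_stream; infer_instance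

def pvWitness_vectors_from_stream : List String :=
  ["preamble", "__Vectors DCD __initial_sp ; Top of Stack",
   "DCD Reset_Handler ; Reset", "", "DCD NMI_Handler ;", "__Vectors_End", "junk"]

def Spec_vectors_from_stream (stream : List String) (out : (List (String × String)) × Int) : Prop := out = vectors_from_stream_alt stream
instance (stream : List String) (out : (List (String × String)) × Int) : Decidable (Spec_vectors_from_stream stream out) := by unfold Spec_vectors_from_stream; infer_instance

-- ===== CLAIM (what is proved, stated in full; the proofs are below) =====
def Claim_equal_vectors_from_stream : Prop := ∀ (stream : List String), Dom_vectors_from_stream stream → Pre_vectors_from_stream stream → Spec_vectors_from_stream stream (vectors_from_stream stream)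

-- ===== LEMMAS AND PROOFS =====

theorem pv_len_nonneg (s : String) : 0 ≤ PySem.Str.len s := by
  simp [PySem.Str.len]

-- proof-only intermediate form: A's loop split into 'skip to header' and 'collect'
def pvFindHeader : List String → List String
  | [] => []
  | line :: rest =>
    let words := PySem.Str.split₀ (((PySem.Str.split? line ";").getD []).headI)
    if words ≠ [] ∧ words.headI = "__Vectors" then rest else pvFindHeader rest

def pvCollect : List String → List (String × String)
  | [] => []
  | line :: rest =>
    let parts := (PySem.Str.split? line ";").getD []
    let words := PySem.Str.split₀ parts.headI
    if words = [] then pvCollect rest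
    else if words.headI = "__Vectors_End" then []
    else (words.getD 1 "", PySem.Str.strip (parts.getD 1 "")) :: pvCollect rest

-- A's loop with found = true is the collector plus the running max over it
theorem pvGoA_true (rest : List String) :
    ∀ (vecs : List (String × String)) (m : Int),
      pvGoA rest true vecs m =
        (vecs ++ pvCollect rest,
         (pvCollect rest).foldl (fun a p => max a (PySem.Str.len p.1)) m) := by
  induction rest with
  | nil => intro vecs m; simp [pvGoA, pvCollect]
  | cons line rest ih =>
    intro vecs m
    by_cases hp : (PySem.Str.split? line ";").getD [] = []
    · simp [pvGoA, pvCollect, hp, ih]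
      exact ⟨fun h => absurd (by decide) h,
        by rw [if_pos (by decide : PySem.Str.split₀ "" = [])]⟩
    · by_cases hw : PySem.Str.split₀ (((PySem.Str.split? line ";").getD []).headI) = []
      · simp only [pvGoA, pvCollect, if_neg hp, hw, ih]
        simp only [if_pos trivial]
      · by_cases he : (PySem.Str.split₀ (((PySem.Str.split? line ";").getD []).headI)).headI
            = "__Vectors_End"
        · simp only [pvGoA, pvCollect, if_neg hp, if_neg hw, he]
          rw [if_neg (by decide : ¬(true = false))]
          simp
        · simp only [pvGoA, pvCollect, if_neg hp, if_neg hw, if_neg he, ih]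
          rw [if_neg (by decide : ¬(true = false))]
          simp only [List.append_assoc, List.singleton_append, List.foldl_cons]

-- A's loop with found = false is the header search followed by the collector
theorem pvGoA_false (stream : List String) :
    pvGoA stream false [] 0 =
      (pvCollect (pvFindHeader stream),
       (pvCollect (pvFindHeader stream)).foldl (fun a p => max a (PySem.Str.len p.1)) 0) := by
  induction stream with
  | nil => simp [pvGoA, pvFindHeader, pvCollect]
  | cons line rest ih =>
    by_cases hp : (PySem.Str.split? line ";").getD [] = []
    · simp [pvGoA, pvFindHeader, hp, ih]
      rw [if_neg (fun h => absurd (by decide : PySem.Str.split₀ "" = []) h.1)]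
      exact ⟨rfl, rfl⟩
    · by_cases hw : PySem.Str.split₀ (((PySem.Str.split? line ";").getD []).headI) = []
      · simp only [pvGoA, pvFindHeader, if_neg hp, hw, ih]
        simp
      · by_cases ht : (PySem.Str.split₀ (((PySem.Str.split? line ";").getD []).headI)).headI
            = "__Vectors"
        · simp only [pvGoA, pvFindHeader, if_neg hp, if_neg hw, ht, pvGoA_true]
          simp [hw]
        · simp only [pvGoA, pvFindHeader, if_neg hp, if_neg hw, if_neg ht, ih]
          simp [hw, ht]

-- B's final max(..., default=0) equals the running max folded from 0
theorem pv_maxD_eq_foldl (vecs : List (String × String)) :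
    PySem.List.maxD (vecs.map (fun p => PySem.Str.len p.1)) (fun x => x) 0 =
      vecs.foldl (fun a p => max a (PySem.Str.len p.1)) 0 := by
  cases vecs with
  | nil => decide
  | cons v t =>
    simp only [List.map_cons, PySem.List.maxD, PySem.List.max?_id_cons, Option.getD_some,
      List.foldl_cons, List.foldl_map, max_eq_right (pv_len_nonneg v.1)]

-- l.take 1 = [x] unpacked
theorem pv_take_one {α : Type} [Inhabited α] (l : List α) (x : α) :
    l.take 1 = [x] ↔ l ≠ [] ∧ l.headI = x := by
  cases l <;> simp

-- the index comprehension '[i for i,x in enumerate(xs) if P x]' : cons step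
theorem pv_idxs_cons {α : Type} (P : α → Bool) (d a : α) (t : List α) :
    (List.range (a :: t).length).filter (fun i => P ((a :: t).getD i d)) =
      (if P a then [0] else []) ++
        ((List.range t.length).filter (fun i => P (t.getD i d))).map (· + 1) := by
  rw [List.length_cons, List.range_succ_eq_map, List.filter_cons]
  simp only [List.getD_cons_zero]
  rw [List.filter_map]
  cases P a <;> simp [Function.comp_def]

-- its first element (default length) is findIdx
theorem pv_idxs_headD {α : Type} (P : α → Bool) (d : α) (xs : List α) :
    ((List.range xs.length).filter (fun i => P (xs.getD i d))).headD xs.length =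
      xs.findIdx P := by
  induction xs with
  | nil => simp
  | cons a t ih =>
    rw [pv_idxs_cons P d a t, List.findIdx_cons]
    cases h : P a
    · rw [if_neg (by simp), List.nil_append, ← ih]
      cases (List.range t.length).filter (fun i => P (t.getD i d)) <;> simp
    · simp

-- it is empty iff findIdx runs off the end
theorem pv_idxs_nil {α : Type} (P : α → Bool) (d : α) (xs : List α) :
    ((List.range xs.length).filter (fun i => P (xs.getD i d))) = [] ↔
      xs.findIdx P = xs.length := by
  induction xs with
  | nil => simp
  | cons a t ih =>
    rw [pv_idxs_cons P d a t, List.findIdx_cons]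
    cases h : P a
    · rw [if_neg (by simp), List.nil_append]
      simp only [List.map_eq_nil_iff, ih, cond_false, List.length_cons]
      omega
    · simp only [cond_true, List.length_cons]
      constructor
      · intro hc; simp at hc
      · intro hc; omega

-- the header search is a drop at the trigger index
theorem pvFindHeader_eq_drop (stream : List String) :
    pvFindHeader stream =
      stream.drop (stream.findIdx (fun l => decide ((pvLineWords l).take 1 = ["__Vectors"])) + 1) := by
  induction stream with
  | nil => simp [pvFindHeader]
  | cons line rest ih =>
    rw [List.findIdx_cons]
    by_cases h : (pvLineWords line).take 1 = ["__Vectors"]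
    · obtain ⟨h1, h2⟩ := (pv_take_one _ _).mp h
      have hc : PySem.Str.split₀ (((PySem.Str.split? line ";").getD []).headI) ≠ [] ∧
          (PySem.Str.split₀ (((PySem.Str.split? line ";").getD []).headI)).headI = "__Vectors" :=
        ⟨h1, h2⟩
      simp only [pvFindHeader]
      rw [if_pos hc]
      simp [h]
    · have hc : ¬ (PySem.Str.split₀ (((PySem.Str.split? line ";").getD []).headI) ≠ [] ∧
          (PySem.Str.split₀ (((PySem.Str.split? line ";").getD []).headI)).headI = "__Vectors") :=
        fun hc => h ((pv_take_one (pvLineWords line) _).mpr hc)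
      simp only [pvFindHeader]
      rw [if_neg hc]
      simp [h, ih, List.drop_succ_cons]

-- the collector is filter+map of the prefix before the end marker
theorem pvCollect_eq_pipeline (l : List String) :
    pvCollect l =
      (((l.take (l.findIdx (fun s => decide ((pvLineWords s).take 1 = ["__Vectors_End"])))).filter
          (fun s => !(pvLineWords s).isEmpty)).map
        (fun s => ((pvLineWords s).getD 1 "",
          PySem.Str.strip (((PySem.Str.split? s ";").getD []).getD 1 "")))) := by
  induction l with
  | nil => simp [pvCollect]
  | cons line rest ih =>
    rw [List.findIdx_cons]
    by_cases hw : pvLineWords line = []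
    · have hw' : PySem.Str.split₀ (((PySem.Str.split? line ";").getD []).headI) = [] := hw
      have hd : decide ((pvLineWords line).take 1 = ["__Vectors_End"]) = false := by
        simp [hw]
      have hfe : (!(pvLineWords line).isEmpty) = false := by simp [hw]
      simp only [pvCollect]
      rw [if_pos hw']
      rw [hd]
      simp only [cond_false, List.take_succ_cons, List.filter_cons, hfe]
      exact ih
    · have hw' : ¬ PySem.Str.split₀ (((PySem.Str.split? line ";").getD []).headI) = [] := hw
      by_cases he : (pvLineWords line).headI = "__Vectors_End"
      · have ht : (pvLineWords line).take 1 = ["__Vectors_End"] := (pv_take_one _ _).mpr ⟨hw, he⟩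
        have he' : (PySem.Str.split₀ (((PySem.Str.split? line ";").getD []).headI)).headI
            = "__Vectors_End" := he
        have hd : decide ((pvLineWords line).take 1 = ["__Vectors_End"]) = true := by
          simp [ht]
        simp only [pvCollect]
        rw [if_neg hw', if_pos he', hd]
        simp
      · have hd : decide ((pvLineWords line).take 1 = ["__Vectors_End"]) = false := by
          simp only [decide_eq_false_iff_not]
          intro hc; exact he ((pv_take_one _ _).mp hc).2
        have he' : ¬ (PySem.Str.split₀ (((PySem.Str.split? line ";").getD []).headI)).headI
            = "__Vectors_End" := he
        have hfe : (!(pvLineWords line).isEmpty) = true := by simp [hw]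
        simp only [pvCollect]
        rw [if_neg hw', if_neg he', hd]
        simp only [cond_false, List.take_succ_cons, List.filter_cons, hfe]
        exact congrArg _ ih

-- B's pipeline equals the skip-then-collect intermediate form
theorem pv_alt_eq (stream : List String) :
    vectors_from_stream_alt stream =
      (pvCollect (pvFindHeader stream),
       PySem.List.maxD ((pvCollect (pvFindHeader stream)).map (fun p => PySem.Str.len p.1))
         (fun x => x) 0) := by
  have hwords : (stream.map (fun line => (PySem.Str.split? line ";").getD [])).map
      (fun parts => PySem.Str.split₀ parts.headI) = stream.map pvLineWords := by
    simp [List.map_map, Function.comp_def, pvLineWords]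
  simp only [vectors_from_stream_alt, hwords]
  set P₁ : List String → Bool := fun w => decide (w.take 1 = ["__Vectors"]) with hP₁
  by_cases hs : (List.range (stream.map pvLineWords).length).filter
      (fun i => decide (((stream.map pvLineWords).getD i []).take 1 = ["__Vectors"])) = []
  · rw [if_pos hs]
    have h1 : (stream.map pvLineWords).findIdx P₁ = (stream.map pvLineWords).length :=
      (pv_idxs_nil P₁ [] (stream.map pvLineWords)).mp hs
    rw [List.findIdx_map, List.length_map] at h1
    have h2 : pvFindHeader stream = [] := by
      rw [pvFindHeader_eq_drop]
      refine List.drop_eq_nil_of_le ?_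
      have : stream.findIdx (fun l => decide ((pvLineWords l).take 1 = ["__Vectors"]))
          = stream.length := h1
      omega
    rw [h2]
    simp only [pvCollect, PySem.List.maxD, List.map_nil]
    decide
  · rw [if_neg hs]
    -- first = the trigger index
    have hhead : ((List.range (stream.map pvLineWords).length).filter
        (fun i => decide (((stream.map pvLineWords).getD i []).take 1 = ["__Vectors"]))).headI
        = stream.findIdx (fun l => decide ((pvLineWords l).take 1 = ["__Vectors"])) := by
      have := pv_idxs_headD P₁ [] (stream.map pvLineWords)
      rw [List.findIdx_map, Function.comp_def] at this
      cases hc : (List.range (stream.map pvLineWords).length).filter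
          (fun i => decide (((stream.map pvLineWords).getD i []).take 1 = ["__Vectors"])) with
      | nil => exact absurd hc hs
      | cons x xs => rw [hc] at this; simpa using this
    rw [hhead]
    set i₀ := stream.findIdx (fun l => decide ((pvLineWords l).take 1 = ["__Vectors"])) with hi₀
    -- tail is the mapped drop
    have hzip : (stream.map (fun line => (PySem.Str.split? line ";").getD [])).zip
        (stream.map pvLineWords)
        = stream.map (fun l => ((PySem.Str.split? l ";").getD [], pvLineWords l)) :=
      List.zip_map'
    have htail : ((stream.map (fun l => ((PySem.Str.split? l ";").getD [], pvLineWords l))).drop (i₀ + 1))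
        = (stream.drop (i₀ + 1)).map (fun l => ((PySem.Str.split? l ";").getD [], pvLineWords l)) := by
      rw [List.map_drop]
    rw [hzip, htail]
    set E := stream.drop (i₀ + 1) with hE
    set F : String → (List String × List String) :=
      fun l => ((PySem.Str.split? l ";").getD [], pvLineWords l) with hF
    have hEfh : pvFindHeader stream = E := by rw [pvFindHeader_eq_drop, ← hi₀]
    set P₂ : List String × List String → Bool :=
      fun pw => decide (pw.2.take 1 = ["__Vectors_End"]) with hP₂
    have hstop : ((List.range (E.map F).length).filter
        (fun k => decide (((E.map F).getD k ([], [])).2.take 1 = ["__Vectors_End"]))).headD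
          (E.map F).length
        = E.findIdx (fun s => decide ((pvLineWords s).take 1 = ["__Vectors_End"])) := by
      have := pv_idxs_headD P₂ ([], []) (E.map F)
      rw [List.findIdx_map, Function.comp_def] at this
      exact this
    rw [hstop]
    set k₀ := E.findIdx (fun s => decide ((pvLineWords s).take 1 = ["__Vectors_End"])) with hk₀
    have htake : (E.map F).take k₀ = (E.take k₀).map F := by rw [List.map_take]
    rw [htake, List.filter_map, List.map_map]
    have hfil : ((fun pw : List String × List String => !pw.2.isEmpty) ∘ F)
        = (fun s => !(pvLineWords s).isEmpty) := rfl
    have hmap : ((fun pw : List String × List String =>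
          (pw.2.getD 1 "", PySem.Str.strip (pw.1.getD 1 ""))) ∘ F)
        = (fun s => ((pvLineWords s).getD 1 "",
            PySem.Str.strip (((PySem.Str.split? s ";").getD []).getD 1 ""))) := rfl
    rw [hfil, hmap, hEfh, ← pvCollect_eq_pipeline]

-- ===== VERDICT (by name: the statement is the Claim_ definition above) =====
theorem vectors_from_stream_spec : Claim_equal_vectors_from_stream := by
  intro stream _ _
  show vectors_from_stream stream = vectors_from_stream_alt stream
  rw [vectors_from_stream, pvGoA_false, pv_alt_eq, pv_maxD_eq_foldl]
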